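-- pv_equiv track=rewrite | github.com/tcollier/aoc-solutions | 2021/03/main.py | get_epsilon
-- ===== SOURCE A (Python) =====
-- def get_epsilon(lines):
--     bits = [0] * 12
--     for line in lines:
--         for index, digit in enumerate(line):
--             bits[index] += 1 if digit == "1" else -1
--     epsilon = ""
--     for bit in bits:
--         epsilon += "0" if bit >= 0 else "1"
--     return epsilon
-- ===== SOURCE B (Python) =====
-- def get_epsilon(lines):
--     # Column-by-column: for each of the 12 fixed positions, count lines that
--     # have a bit there and how many of those are '1'; majority decides.
--     out = []
--     for j in range(12):
--         ones = sum(1 for line in lines if j < len(line) and line[j] == "1")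
--         present = sum(1 for line in lines if j < len(line))
--         out.append("0" if 2 * ones >= present else "1")
--     return "".join(out)
-- ===== Notes on version B (the rewrite author's own statement) =====
-- stated objective: alternative
-- what changed: B interchanges the loops: instead of A's row-by-row mutation of a 12-slot signed counter array, B scans column-by-column over the 12 fixed positions, counting present bits and ones per column and deciding each output character by a majority comparison 2*ones >= present.
import Mathlib
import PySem

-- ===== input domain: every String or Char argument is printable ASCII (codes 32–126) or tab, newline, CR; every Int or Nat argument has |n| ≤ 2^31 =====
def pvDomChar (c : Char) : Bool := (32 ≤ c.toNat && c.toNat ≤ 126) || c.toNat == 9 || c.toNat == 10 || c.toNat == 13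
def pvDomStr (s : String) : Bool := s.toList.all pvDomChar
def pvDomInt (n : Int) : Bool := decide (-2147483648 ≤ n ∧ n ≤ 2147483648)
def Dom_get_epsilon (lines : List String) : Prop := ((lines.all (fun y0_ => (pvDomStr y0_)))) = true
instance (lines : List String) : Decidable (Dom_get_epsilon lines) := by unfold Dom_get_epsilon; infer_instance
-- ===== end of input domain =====

-- B computes epsilon column-by-column (count ones/present per fixed position) instead of
-- A's row-by-row updates of a signed 12-counter array; objective: alternative decomposition.


-- ===== PORT A =====
-- bits[index] += …: inside Pre_ every index is < 12, so set/getD are exact; enumerate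
-- indices are ≥ 0, so .toNat is exact.
def get_epsilon (lines : List String) : String :=
  let bits : List Int := List.replicate 12 0
  let bits := lines.foldl (fun bits line =>
    (PySem.List.enumerate line.toList 0).foldl
      (fun bits p => bits.set p.1.toNat ((bits.getD p.1.toNat 0) + (if p.2 = '1' then (1 : Int) else -1)))
      bits) bits
  bits.foldl (fun eps bit => eps ++ (if bit ≥ 0 then "0" else "1")) ""

-- ===== PORT B =====
def get_epsilon_alt (lines : List String) : String :=
  String.join ((List.range 12).map (fun j =>
    let ones := lines.countP (fun line => decide (j < line.toList.length) && (line.toList[j]? == some '1'))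
    let present := lines.countP (fun line => decide (j < line.toList.length))
    if 2 * (ones : Int) ≥ (present : Int) then "0" else "1"))

-- ===== PRECONDITION & SPEC =====
-- Pre_ excludes exactly the inputs on which A raises IndexError: a line longer than 12 chars.
def Pre_get_epsilon (lines : List String) : Prop := ∀ l ∈ lines, l.toList.length ≤ 12
instance (lines : List String) : Decidable (Pre_get_epsilon lines) := by unfold Pre_get_epsilon; infer_instance
def pvWitness_get_epsilon : List String := ["101", "111111111111", ""]

def Spec_get_epsilon (lines : List String) (out : String) : Prop := out = get_epsilon_alt lines
instance (lines : List String) (out : String) : Decidable (Spec_get_epsilon lines out) := by unfold Spec_get_epsilon; infer_instance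

-- ===== CLAIM (what is proved, stated in full; the proofs are below) =====
def Claim_equal_get_epsilon : Prop := ∀ (lines : List String), Dom_get_epsilon lines → Pre_get_epsilon lines → Spec_get_epsilon lines (get_epsilon lines)


-- ===== LEMMAS AND PROOFS =====

-- contribution of one line to A's counter at column j
def pvContrib (l : List Char) (j : Nat) : Int :=
  match l[j]? with
  | some c => if c = '1' then 1 else -1
  | none => 0

def pvTotal (lines : List String) (j : Nat) : Int :=
  (lines.map (fun s => pvContrib s.toList j)).sum

theorem pvContrib_succ (c : Char) (cs : List Char) (k : Nat) :
    pvContrib (c :: cs) (k + 1) = pvContrib cs k := by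
  simp [pvContrib]

-- the inner fold preserves the length of bits
theorem inner_length (ps : List (Int × Char)) (bits : List Int) :
    (ps.foldl (fun bits p =>
      bits.set p.1.toNat ((bits.getD p.1.toNat 0) + (if p.2 = '1' then (1 : Int) else -1))) bits).length
      = bits.length := by
  induction ps generalizing bits with
  | nil => rfl
  | cons p ps ih => rw [List.foldl_cons, ih, List.length_set]

-- effect of the inner fold on entry j, starting at index s
theorem inner_foldl (cs : List Char) (s : Nat) (bits : List Int)
    (h : s + cs.length <= bits.length) (j : Nat) :
    ((PySem.List.enumerate cs (s : Int)).foldl (fun bits p =>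
        bits.set p.1.toNat ((bits.getD p.1.toNat 0) + (if p.2 = '1' then (1 : Int) else -1))) bits)[j]?
      = bits[j]?.map (fun v => v + (if s <= j then pvContrib cs (j - s) else 0)) := by
  induction cs generalizing s bits with
  | nil =>
    cases h' : bits[j]? <;> simp [PySem.List.enumerate, pvContrib, h']
  | cons c cs ih =>
    rw [PySem.List.enumerate_cons, List.foldl_cons]
    have hs : s < bits.length := by simp at h; omega
    have hcast : ((s : Int) + 1) = ((s + 1 : Nat) : Int) := by push_cast; ring
    have htn : ((s : Int)).toNat = s := Int.toNat_natCast s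
    rw [htn, hcast,
      ih (s + 1) (bits.set s ((bits.getD s 0) + (if c = '1' then (1 : Int) else -1)))
        (by rw [List.length_set]; simp at h; omega)]
    have hset : ∀ (v : Int), (bits.set s v)[j]? = if s = j then some v else bits[j]? := by
      intro v
      rw [List.getElem?_set]
      by_cases hj : s = j
      . simp [hj, hj ▸ hs]
      . simp [hj]
    rw [hset]
    by_cases hj : s = j
    . subst hj
      have hg : bits[s]? = some bits[s] := List.getElem?_eq_getElem hs
      simp [hg, pvContrib]
    . by_cases hle : s + 1 <= j
      . have h0 : s <= j := by omega
        have hsub : j - s = (j - (s + 1)) + 1 := by omega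
        simp [hj, hle, h0, hsub, pvContrib_succ]
      . have h0 : ¬ s <= j := by omega
        simp [hj, hle, h0]

-- effect of the outer fold: entry j accumulates pvTotal
theorem outer_foldl (lines : List String) (bits : List Int) (h12 : bits.length = 12)
    (hall : ∀ l ∈ lines, l.toList.length <= 12) (j : Nat) :
    (lines.foldl (fun bits line =>
      (PySem.List.enumerate line.toList 0).foldl
        (fun bits p => bits.set p.1.toNat ((bits.getD p.1.toNat 0) + (if p.2 = '1' then (1 : Int) else -1)))
        bits) bits)[j]?
      = bits[j]?.map (fun v => v + pvTotal lines j) := by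
  induction lines generalizing bits with
  | nil =>
    cases h' : bits[j]? <;> simp [pvTotal, h']
  | cons l ls ih =>
    rw [List.foldl_cons]
    have hl : l.toList.length <= 12 := hall l (by simp)
    have hlen1 := inner_length (PySem.List.enumerate l.toList 0) bits
    have h1 := inner_foldl l.toList 0 bits (by omega) j
    simp only [Nat.cast_zero, Nat.zero_le, if_true, Nat.sub_zero] at h1
    rw [ih _ (by rw [hlen1]; omega) (fun x hx => hall x (by simp [hx])), h1]
    cases bits[j]? with
    | none => rfl
    | some v =>
      simp [pvTotal]
      ring

-- A's final bits list is exactly (range 12).map (pvTotal lines)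
theorem bits_eq (lines : List String) (hall : ∀ l ∈ lines, l.toList.length <= 12) :
    (lines.foldl (fun bits line =>
      (PySem.List.enumerate line.toList 0).foldl
        (fun bits p => bits.set p.1.toNat ((bits.getD p.1.toNat 0) + (if p.2 = '1' then (1 : Int) else -1)))
        bits) (List.replicate 12 0))
      = (List.range 12).map (pvTotal lines) := by
  apply List.ext_getElem?
  intro j
  rw [outer_foldl lines _ (by simp) hall j]
  rw [List.getElem?_map, List.getElem?_replicate]
  by_cases hj : j < 12
  . simp [hj]
  . simp [hj]

theorem join_cons (a : String) (l : List String) : String.join (a :: l) = a ++ String.join l := by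
  show List.foldl (· ++ ·) ("" ++ a) l = a ++ List.foldl (· ++ ·) "" l
  haveI : Std.Associative (fun x1 x2 : String => x1 ++ x2) := ⟨fun _ _ _ => String.append_assoc⟩
  rw [show ("" ++ a) = ((· ++ ·) a "") by simp, List.foldl_assoc]

-- folding string concatenation = join of map
theorem foldl_str (f : Int → String) (bits : List Int) (acc : String) :
    bits.foldl (fun eps bit => eps ++ f bit) acc = acc ++ String.join (bits.map f) := by
  induction bits generalizing acc with
  | nil => simp [String.join]
  | cons b bs ih =>
    rw [List.foldl_cons, ih, List.map_cons, join_cons, String.append_assoc]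

-- per-column: A's counter equals 2*ones - present
theorem total_eq (lines : List String) (j : Nat) :
    pvTotal lines j =
      2 * (lines.countP (fun line => decide (j < line.toList.length) && (line.toList[j]? == some '1')) : Int)
        - (lines.countP (fun line => decide (j < line.toList.length)) : Int) := by
  induction lines with
  | nil => simp [pvTotal]
  | cons l ls ih =>
    have hmap : pvTotal (l :: ls) j = pvContrib l.toList j + pvTotal ls j := by
      simp [pvTotal]
    rw [hmap, ih]
    simp only [List.countP_cons]
    cases hc : l.toList[j]? with
    | none =>
      have hj : l.toList.length <= j := List.getElem?_eq_none_iff.mp hc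
      have hp2 : decide (j < l.toList.length) = false := decide_eq_false (by omega)
      have hp1 : (decide (j < l.toList.length) && ((none : Option Char) == some '1')) = false := by
        rw [hp2, Bool.false_and]
      have hcon : pvContrib l.toList j = 0 := by simp [pvContrib, hc]
      rw [hp1, hp2, hcon]
      simp
    | some c =>
      have hjlt : j < l.toList.length := (List.getElem?_eq_some_iff.mp hc).1
      have hp2 : decide (j < l.toList.length) = true := decide_eq_true hjlt
      by_cases h1 : c = '1'
      . have hp1 : (decide (j < l.toList.length) && (some c == some '1')) = true := by
          rw [hp2, Bool.true_and]; exact beq_iff_eq.mpr (by rw [h1])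
        have hcon : pvContrib l.toList j = 1 := by simp [pvContrib, hc, h1]
        rw [hp1, hp2, hcon]
        simp
        ring
      . have hp1 : (decide (j < l.toList.length) && (some c == some '1')) = false := by
          rw [hp2, Bool.true_and]
          exact beq_eq_false_iff_ne.mpr (fun h => h1 (Option.some.inj h))
        have hcon : pvContrib l.toList j = -1 := by simp [pvContrib, hc, h1]
        rw [hp1, hp2, hcon]
        simp
        ring

-- ===== VERDICT (by name: the statement is the Claim_ definition above) =====
theorem get_epsilon_spec : Claim_equal_get_epsilon := by
  intro lines _ hpre
  unfold Spec_get_epsilon get_epsilon get_epsilon_alt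
  dsimp only
  rw [bits_eq lines hpre, foldl_str, List.map_map]
  have hmap : (List.range 12).map ((fun bit => if bit ≥ 0 then "0" else "1") ∘ pvTotal lines)
      = (List.range 12).map (fun j =>
          if 2 * ((lines.countP (fun line => decide (j < line.toList.length) && (line.toList[j]? == some '1'))) : Int)
              ≥ ((lines.countP (fun line => decide (j < line.toList.length))) : Int) then "0" else "1") := by
    apply List.map_congr_left
    intro j _
    simp only [Function.comp_apply]
    rw [total_eq lines j]
    by_cases hge : (2 * ((lines.countP (fun line => decide (j < line.toList.length) && (line.toList[j]? == some '1'))) : Int)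
        - ((lines.countP (fun line => decide (j < line.toList.length))) : Int)) ≥ 0
    . rw [if_pos hge, if_pos (by omega)]
    . rw [if_neg hge, if_neg (by omega)]
  rw [hmap]
  simp
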